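-- pv_equiv track=rewrite | github.com/bnganyi/kentender_v1 | kentender_procurement/kentender_procurement/tender_management/services/works_tender_hardening_validation_checks.py | _status_for_findings
-- ===== SOURCE A (Python) =====
-- from typing import Any
--
-- SEVERITY_CRITICAL = "Critical"
--
-- SEVERITY_INFO = "Info"
--
-- HARDENING_STATUS_PASS = "Pass"
--
-- HARDENING_STATUS_WARNING = "Warning"
--
-- HARDENING_STATUS_BLOCKED = "Blocked"
--
-- def _status_for_findings(findings: list[dict[str, Any]]) -> str:
-- 	if not findings:
-- 		return HARDENING_STATUS_PASS
-- 	if any(f.get("severity") == SEVERITY_CRITICAL for f in findings):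
-- 		return HARDENING_STATUS_BLOCKED
-- 	if any(f.get("severity") != SEVERITY_INFO for f in findings):
-- 		return HARDENING_STATUS_WARNING
-- 	return HARDENING_STATUS_PASS
-- ===== SOURCE B (Python) =====
-- SEVERITY_CRITICAL = "Critical"
-- SEVERITY_INFO = "Info"
-- HARDENING_STATUS_PASS = "Pass"
-- HARDENING_STATUS_WARNING = "Warning"
-- HARDENING_STATUS_BLOCKED = "Blocked"
--
-- def _status_for_findings(findings: list) -> str:
-- 	has_warning = False
-- 	for f in findings:
-- 		sev = f.get("severity")
-- 		if sev == SEVERITY_CRITICAL: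
-- 			return HARDENING_STATUS_BLOCKED
-- 		if sev != SEVERITY_INFO:
-- 			has_warning = True
-- 	return HARDENING_STATUS_WARNING if has_warning else HARDENING_STATUS_PASS
-- ===== Notes on version B (the rewrite author's own statement) =====
-- stated objective: simpler
-- what changed: Replaces A's three-pass structure (emptiness check plus two any(...) scans over the list) with a single loop that returns Blocked immediately on a Critical severity and otherwise tracks a has_warning flag, deciding Warning/Pass after the loop.
import Mathlib
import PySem

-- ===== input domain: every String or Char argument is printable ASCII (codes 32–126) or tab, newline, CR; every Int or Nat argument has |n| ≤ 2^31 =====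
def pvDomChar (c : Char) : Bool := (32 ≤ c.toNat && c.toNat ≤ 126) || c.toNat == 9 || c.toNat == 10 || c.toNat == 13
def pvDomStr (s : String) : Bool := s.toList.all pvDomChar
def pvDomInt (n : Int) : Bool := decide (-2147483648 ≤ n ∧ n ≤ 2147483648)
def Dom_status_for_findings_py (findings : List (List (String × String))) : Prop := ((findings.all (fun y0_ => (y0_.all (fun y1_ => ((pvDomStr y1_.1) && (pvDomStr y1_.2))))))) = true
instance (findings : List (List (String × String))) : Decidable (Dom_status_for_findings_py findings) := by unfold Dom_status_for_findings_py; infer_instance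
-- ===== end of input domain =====

-- B replaces A's three passes (emptiness check + two any(...) scans) with one loop carrying a
-- has_warning flag; objective: simpler (single pass, same results).

-- ===== PORT A =====
-- f.get("severity") → Option String; Python's None compares unequal to any string.
def status_for_findings_py (findings : List (List (String × String))) : String :=
  if findings = [] then "Pass"
  else if findings.any (fun f => (PySem.Dict.mk f).get? "severity" == some "Critical") then "Blocked"
  else if findings.any (fun f => (PySem.Dict.mk f).get? "severity" != some "Info") then "Warning"
  else "Pass"

-- ===== PORT B =====
-- the single loop of Source B: early return on Critical, has_warning accumulator otherwise
def statusAltLoop (findings : List (List (String × String))) (hasWarning : Bool) : String :=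
  match findings with
  | [] => if hasWarning then "Warning" else "Pass"
  | f :: rest =>
    let sev := (PySem.Dict.mk f).get? "severity"
    if sev == some "Critical" then "Blocked"
    else if sev != some "Info" then statusAltLoop rest true
    else statusAltLoop rest hasWarning

def status_for_findings_py_alt (findings : List (List (String × String))) : String :=
  statusAltLoop findings false

-- ===== PRECONDITION & SPEC =====
def Spec_status_for_findings_py (findings : List (List (String × String))) (out : String) : Prop := out = status_for_findings_py_alt findings
instance (findings : List (List (String × String))) (out : String) : Decidable (Spec_status_for_findings_py findings out) := by unfold Spec_status_for_findings_py; infer_instance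

-- ===== CLAIM (what is proved, stated in full; the proofs are below) =====
def Claim_equal_status_for_findings_py : Prop := ∀ (findings : List (List (String × String))), Dom_status_for_findings_py findings → Spec_status_for_findings_py findings (status_for_findings_py findings)

-- ===== LEMMAS AND PROOFS =====
-- loop invariant: the single pass equals A's "Blocked if any Critical, else Warning if flag or any non-Info, else Pass"
theorem statusAltLoop_eq (findings : List (List (String × String))) (hw : Bool) :
    statusAltLoop findings hw =
      (if findings.any (fun f => (PySem.Dict.mk f).get? "severity" == some "Critical") then "Blocked"
       else if hw || findings.any (fun f => (PySem.Dict.mk f).get? "severity" != some "Info") then "Warning"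
       else "Pass") := by
  induction findings generalizing hw with
  | nil => simp [statusAltLoop]
  | cons f rest ih =>
    simp only [statusAltLoop, List.any_cons]
    by_cases hc : ((PySem.Dict.mk f).get? "severity" == some "Critical") = true
    · simp [hc]
    · simp only [Bool.not_eq_true] at hc
      by_cases hi : ((PySem.Dict.mk f).get? "severity" != some "Info") = true
      · simp [hc, hi, ih]
      · simp only [Bool.not_eq_true] at hi
        simp [hc, hi, ih]

-- ===== VERDICT (by name: the statement is the Claim_ definition above) =====
theorem status_for_findings_py_spec : Claim_equal_status_for_findings_py := by
  intro findings _
  unfold Spec_status_for_findings_py status_for_findings_py status_for_findings_py_alt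
  rw [statusAltLoop_eq]
  cases findings <;> simp
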